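-- pv_equiv track=rewrite | github.com/u-r-a-bot/NANO-KIMI-K2 | dataset.py | _select_best_config
-- ===== SOURCE A (Python) =====
-- from typing import List, Optional, Union, Dict, Any
--
-- def _select_best_config(configs: List[str]) -> str:
--     """Select the best config from available configs"""
--     # Priority order for common patterns
--     priority_patterns = [
--         'default',
--         'train',
--         'all',
--         '100k',  # cosmopedia-100k
--         'en',
--         '4plus',  # finemath-4plus (highest quality)
--         '3plus',
--         'auto_math_text' # hugginfaceTB Cosmopedia ->math
--     ]
--
--     # Try to find a config matching priority patterns
--     for pattern in priority_patterns:
--         for config in configs: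
--             if pattern in config.lower():
--                 return config
--
--     # If no pattern matches, return first config
--     return configs[0]
-- ===== SOURCE B (Python) =====
-- def _select_best_config(configs):
--     """Select the best config from available configs"""
--     priority_patterns = [
--         'default',
--         'train',
--         'all',
--         '100k',
--         'en',
--         '4plus',
--         '3plus',
--         'auto_math_text'
--     ]
--     best = None
--     best_rank = len(priority_patterns)
--     for config in configs:
--         low = config.lower()
--         rank = next((i for i, p in enumerate(priority_patterns) if p in low),
--                     len(priority_patterns))
--         if rank < best_rank:
--             best = config
--             best_rank = rank
--     if best is not None:
--         return best
--     return configs[0]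
-- ===== Notes on version B (the rewrite author's own statement) =====
-- stated objective: alternative
-- what changed: Flipped the nesting to config-major: one pass over configs computing each config's first-matching-pattern rank, keeping the running minimum-rank config with strict < so ties go to the earlier config; A instead rescans all configs once per pattern.
import Mathlib
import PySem

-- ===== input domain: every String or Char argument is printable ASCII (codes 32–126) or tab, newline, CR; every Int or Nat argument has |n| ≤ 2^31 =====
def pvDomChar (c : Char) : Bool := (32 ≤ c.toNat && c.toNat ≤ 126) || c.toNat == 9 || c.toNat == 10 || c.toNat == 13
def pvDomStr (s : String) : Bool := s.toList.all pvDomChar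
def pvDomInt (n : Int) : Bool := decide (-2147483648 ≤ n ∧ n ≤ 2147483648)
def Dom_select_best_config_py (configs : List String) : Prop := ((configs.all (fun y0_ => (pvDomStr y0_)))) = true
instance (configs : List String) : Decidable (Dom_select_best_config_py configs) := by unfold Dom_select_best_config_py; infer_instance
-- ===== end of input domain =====

-- B flips A's pattern-major nested scan into one config-major pass keeping the minimum-rank
-- config, ties broken by strict '<' (objective: alternative decomposition, same cost).

def pvPatterns : List String :=
  ["default", "train", "all", "100k", "en", "4plus", "3plus", "auto_math_text"]

-- ===== PORT A =====
-- inner loop: 'for config in configs: if pattern in config.lower(): return config'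
def pvFindConfig (pattern : String) : List String → Option String
  | [] => none
  | c :: cs =>
    if PySem.Str.isIn pattern (PySem.Str.lower c) then some c else pvFindConfig pattern cs

-- outer loop: 'for pattern in priority_patterns: …'
def pvFindByPatterns : List String → List String → Option String
  | [], _ => none
  | p :: ps, configs =>
    match pvFindConfig p configs with
    | some c => some c
    | none => pvFindByPatterns ps configs

def select_best_config_py (configs : List String) : String :=
  match pvFindByPatterns pvPatterns configs with
  | some c => c
  | none => configs.headD ""   -- configs[0]; Pre_ excludes [], where Python raises IndexError

-- ===== PORT B =====
-- rank = index of the first pattern contained in the lowercased config, else len(patterns)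
def pvRankIn (low : String) : List String → Nat
  | [] => 0
  | p :: ps => if PySem.Str.isIn p low then 0 else pvRankIn low ps + 1

-- 'for config in configs: … if rank < best_rank: best, best_rank = config, rank'
def pvBestLoop (ps : List String) : Option String → Nat → List String → Option String × Nat
  | best, bestRank, [] => (best, bestRank)
  | best, bestRank, c :: cs =>
    let r := pvRankIn (PySem.Str.lower c) ps
    if r < bestRank then pvBestLoop ps (some c) r cs else pvBestLoop ps best bestRank cs

def select_best_config_py_alt (configs : List String) : String :=
  match (pvBestLoop pvPatterns none pvPatterns.length configs).1 with
  | some c => c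
  | none => configs.headD ""   -- configs[0]; Pre_ excludes [], where Python raises IndexError

-- ===== PRECONDITION & SPEC =====
-- Pre_ excludes only the empty list, on which A (and B) raise IndexError at configs[0].
def Pre_select_best_config_py (configs : List String) : Prop := configs ≠ []
instance (configs : List String) : Decidable (Pre_select_best_config_py configs) := by
  unfold Pre_select_best_config_py; infer_instance

def pvWitness_select_best_config_py : List String := ["foo"]

def Spec_select_best_config_py (configs : List String) (out : String) : Prop :=
  out = select_best_config_py_alt configs
instance (configs : List String) (out : String) : Decidable (Spec_select_best_config_py configs out) := by
  unfold Spec_select_best_config_py; infer_instance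

-- ===== CLAIM (what is proved, stated in full; the proofs are below) =====
def Claim_equal_select_best_config_py : Prop :=
  ∀ (configs : List String), Dom_select_best_config_py configs →
    Pre_select_best_config_py configs →
    Spec_select_best_config_py configs (select_best_config_py configs)

-- ===== LEMMAS AND PROOFS =====

-- once best_rank is 0 the strict '<' test never fires again
theorem pvBestLoop_zero (ps : List String) (best : Option String) :
    ∀ cs : List String, pvBestLoop ps best 0 cs = (best, 0) := by
  intro cs
  induction cs with
  | nil => rfl
  | cons c cs ih => simp [pvBestLoop, ih]

-- a first config of rank 0 wins regardless of the accumulated state (as long as bestRank ≥ 1)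
theorem pvBestLoop_capture (p : String) (ps : List String) :
    ∀ (cs : List String) (best : Option String) (b : Nat) (c : String),
      1 ≤ b → pvFindConfig p cs = some c →
      (pvBestLoop (p :: ps) best b cs).1 = some c := by
  intro cs
  induction cs with
  | nil => intro best b c _ h; simp [pvFindConfig] at h
  | cons x cs ih =>
    intro best b c hb h
    rw [pvFindConfig] at h
    by_cases hx : PySem.Str.isIn p (PySem.Str.lower x) = true
    · rw [if_pos hx] at h
      cases h
      have hr : pvRankIn (PySem.Str.lower x) (p :: ps) = 0 := by
        rw [pvRankIn, if_pos hx]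
      rw [pvBestLoop]
      simp only [hr]
      rw [if_pos (Nat.lt_of_lt_of_le Nat.zero_lt_one hb), pvBestLoop_zero]
    · rw [if_neg hx] at h
      have hr : pvRankIn (PySem.Str.lower x) (p :: ps)
          = pvRankIn (PySem.Str.lower x) ps + 1 := by
        rw [pvRankIn, if_neg hx]
      rw [pvBestLoop]
      simp only [hr]
      by_cases hc : pvRankIn (PySem.Str.lower x) ps + 1 < b
      · rw [if_pos hc]
        exact ih (some x) _ c (Nat.succ_le_succ (Nat.zero_le _)) h
      · rw [if_neg hc]
        exact ih best b c hb h

-- if no config contains p, prepending p shifts every rank and the threshold by 1 in lockstep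
theorem pvBestLoop_shift (p : String) (ps : List String) :
    ∀ (cs : List String) (best : Option String) (b : Nat),
      pvFindConfig p cs = none →
      (pvBestLoop (p :: ps) best (b + 1) cs).1 = (pvBestLoop ps best b cs).1 := by
  intro cs
  induction cs with
  | nil => intro best b _; rfl
  | cons x cs ih =>
    intro best b h
    rw [pvFindConfig] at h
    by_cases hx : PySem.Str.isIn p (PySem.Str.lower x) = true
    · rw [if_pos hx] at h; exact absurd h (by simp)
    · rw [if_neg hx] at h
      have hr : pvRankIn (PySem.Str.lower x) (p :: ps)
          = pvRankIn (PySem.Str.lower x) ps + 1 := by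
        rw [pvRankIn, if_neg hx]
      rw [pvBestLoop, pvBestLoop]
      simp only [hr, Nat.add_lt_add_iff_right]
      by_cases hc : pvRankIn (PySem.Str.lower x) ps < b
      · rw [if_pos hc, if_pos hc]; exact ih (some x) _ h
      · rw [if_neg hc, if_neg hc]; exact ih best b h

-- the heart of the equivalence: A's nested scan = first component of B's single pass
theorem pvMain : ∀ (ps configs : List String),
    pvFindByPatterns ps configs = (pvBestLoop ps none ps.length configs).1 := by
  intro ps
  induction ps with
  | nil => intro configs; simp [pvFindByPatterns, pvBestLoop_zero]
  | cons p ps ih =>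
    intro configs
    cases h : pvFindConfig p configs with
    | some c =>
      simp only [pvFindByPatterns, h, List.length_cons]
      exact (pvBestLoop_capture p ps configs none (ps.length + 1) c
        (Nat.succ_le_succ (Nat.zero_le _)) h).symm
    | none =>
      simp only [pvFindByPatterns, h, List.length_cons]
      rw [pvBestLoop_shift p ps configs none ps.length h]
      exact ih configs

-- ===== VERDICT (by name: the statement is the Claim_ definition above) =====
theorem select_best_config_py_spec : Claim_equal_select_best_config_py := by
  intro configs _ _
  unfold Spec_select_best_config_py select_best_config_py select_best_config_py_alt
  rw [pvMain]
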